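-- pv_equiv track=rewrite | github.com/Simba-Avionic/gs_titania | src/tests/ultimate_test_send.py | calculate_subtests_count
-- ===== SOURCE A (Python) =====
-- frame_combinations = {
--     "short_fast": [16, 1024, 64, 8*1024],  # 8 kb/s
--     "medium_fast": [64, 1024, 64, 32 * 1024],  # 32 kb/s
--     "long_fast": [200, 1024, 64, 102 * 1024],  # 102 kb/s
--     "short_quick": [16, 128, 8, 1 * 1024],  # 1 kb/s
--     "medium_quick": [64, 128, 8, 4 * 1024],  # 4 kb/s
--     "long_quick": [200, 128, 8, 12 * 1024],  # 12 kb/s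
--     "short_slow": [16, 16, 1, 128],  # 128 b/s
--     "medium_slow": [64, 16, 1, 512],  # 512 b/s
--     "long_slow": [200, 16, 1, 1600],  # 1.6 kb/s
-- }
--
-- slower_than_2kbps = {k: v for k, v in frame_combinations.items() if v[3] < 2 * 1024}
--
-- slower_than_16kbps = {k: v for k, v in frame_combinations.items() if v[3] < 16 * 1024}
--
-- def calculate_subtests_count(power_list, air_rate_list, X_speed=0, Y_speed=0):
--     subtest_count = 0
--     for air_spd in air_rate_list:
--         if air_spd == X_speed:
--             subtest_count += len(slower_than_2kbps)
--         elif air_spd == Y_speed: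
--             subtest_count += len(slower_than_16kbps)
--         else:
--             subtest_count += len(frame_combinations)
--     return subtest_count * len(power_list)
-- ===== SOURCE B (Python) =====
-- frame_combinations = {
--     "short_fast": [16, 1024, 64, 8*1024],
--     "medium_fast": [64, 1024, 64, 32 * 1024],
--     "long_fast": [200, 1024, 64, 102 * 1024],
--     "short_quick": [16, 128, 8, 1 * 1024],
--     "medium_quick": [64, 128, 8, 4 * 1024],
--     "long_quick": [200, 128, 8, 12 * 1024],
--     "short_slow": [16, 16, 1, 128],
--     "medium_slow": [64, 16, 1, 512],
--     "long_slow": [200, 16, 1, 1600],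
-- }
-- slower_than_2kbps = {k: v for k, v in frame_combinations.items() if v[3] < 2 * 1024}
-- slower_than_16kbps = {k: v for k, v in frame_combinations.items() if v[3] < 16 * 1024}
--
-- def calculate_subtests_count(power_list, air_rate_list, X_speed=0, Y_speed=0):
--     lst = list(air_rate_list)
--     cx = sum(1 for a in lst if a == X_speed)
--     cy = sum(1 for a in lst if a != X_speed and a == Y_speed)
--     crest = len(lst) - cx - cy
--     return (cx * len(slower_than_2kbps)
--             + cy * len(slower_than_16kbps)
--             + crest * len(frame_combinations)) * len(power_list)
-- ===== Notes on version B (the rewrite author's own statement) =====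
-- stated objective: alternative
-- what changed: Replaced the per-element if/elif accumulation loop with three count comprehensions (X-matches, Y-but-not-X matches, rest) combined in one closed-form arithmetic expression.
import Mathlib
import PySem

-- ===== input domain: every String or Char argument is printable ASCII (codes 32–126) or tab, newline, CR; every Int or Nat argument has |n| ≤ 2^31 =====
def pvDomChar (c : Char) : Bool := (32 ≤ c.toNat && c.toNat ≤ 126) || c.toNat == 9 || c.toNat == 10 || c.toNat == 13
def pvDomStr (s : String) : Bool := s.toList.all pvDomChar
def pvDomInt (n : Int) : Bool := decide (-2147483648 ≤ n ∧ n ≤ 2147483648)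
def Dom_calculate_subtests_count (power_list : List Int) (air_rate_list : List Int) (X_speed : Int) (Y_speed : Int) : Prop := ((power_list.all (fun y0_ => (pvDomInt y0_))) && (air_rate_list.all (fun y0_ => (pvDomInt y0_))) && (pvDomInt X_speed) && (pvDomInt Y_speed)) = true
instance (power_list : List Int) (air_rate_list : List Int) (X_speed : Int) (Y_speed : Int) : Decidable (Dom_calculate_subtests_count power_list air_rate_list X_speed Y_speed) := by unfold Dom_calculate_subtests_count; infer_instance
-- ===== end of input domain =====

-- ===== PORT A =====
-- B replaces the per-element if/elif loop by count-then-closed-form arithmetic (objective: alternative).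
-- module constants: len(slower_than_2kbps)=4, len(slower_than_16kbps)=7, len(frame_combinations)=9
def calculate_subtests_count (power_list : List Int) (air_rate_list : List Int) (X_speed : Int) (Y_speed : Int) : Int :=
  let subtest_count : Int :=
    air_rate_list.foldl (fun subtest_count air_spd =>
      if air_spd == X_speed then subtest_count + 4
      else if air_spd == Y_speed then subtest_count + 7
      else subtest_count + 9) 0
  subtest_count * (power_list.length : Int)

-- ===== PORT B =====
def calculate_subtests_count_alt (power_list : List Int) (air_rate_list : List Int) (X_speed : Int) (Y_speed : Int) : Int :=
  let lst := air_rate_list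
  let cx : Int := (lst.countP (fun a => a == X_speed) : Nat)
  let cy : Int := (lst.countP (fun a => a != X_speed && a == Y_speed) : Nat)
  let crest : Int := (lst.length : Int) - cx - cy
  (cx * 4 + cy * 7 + crest * 9) * (power_list.length : Int)

-- ===== PRECONDITION & SPEC =====
def Spec_calculate_subtests_count (power_list : List Int) (air_rate_list : List Int) (X_speed : Int) (Y_speed : Int) (out : Int) : Prop := out = calculate_subtests_count_alt power_list air_rate_list X_speed Y_speed
instance (power_list : List Int) (air_rate_list : List Int) (X_speed : Int) (Y_speed : Int) (out : Int) : Decidable (Spec_calculate_subtests_count power_list air_rate_list X_speed Y_speed out) := by unfold Spec_calculate_subtests_count; infer_instance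

-- ===== CLAIM (what is proved, stated in full; the proofs are below) =====
def Claim_equal_calculate_subtests_count : Prop := ∀ (power_list : List Int) (air_rate_list : List Int) (X_speed : Int) (Y_speed : Int), Dom_calculate_subtests_count power_list air_rate_list X_speed Y_speed → Spec_calculate_subtests_count power_list air_rate_list X_speed Y_speed (calculate_subtests_count power_list air_rate_list X_speed Y_speed)

-- ===== LEMMAS AND PROOFS =====

-- ===== VERDICT (by name: the statement is the Claim_ definition above) =====
theorem pv_loop_eq (X Y : Int) (l : List Int) (acc : Int) :
    l.foldl (fun s a => if a == X then s + 4 else if a == Y then s + 7 else s + 9) acc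
      = acc + (l.countP (fun a => a == X) : Int) * 4
        + (l.countP (fun a => a != X && a == Y) : Int) * 7
        + ((l.length : Int) - (l.countP (fun a => a == X) : Int)
            - (l.countP (fun a => a != X && a == Y) : Int)) * 9 := by
  simp only [bne]
  induction l generalizing acc with
  | nil => simp
  | cons h t ih =>
    simp only [List.foldl_cons, List.countP_cons, List.length_cons]
    by_cases hx : h = X
    · have hbx : (h == X) = true := by simp [hx]
      simp only [hbx, if_true, Bool.not_true, Bool.false_and]
      rw [ih]; push_cast; ring
    · have hbx : (h == X) = false := by simp [hx]
      by_cases hy : h = Y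
      · have hby : (h == Y) = true := by simp [hy]
        simp only [hbx, Bool.false_eq_true, if_false, hby, if_true, Bool.not_false, Bool.true_and]
        rw [ih]; push_cast; ring
      · have hby : (h == Y) = false := by simp [hy]
        simp only [hbx, hby, Bool.false_eq_true, if_false, Bool.not_false, Bool.true_and]
        rw [ih]; push_cast; ring

theorem calculate_subtests_count_spec : Claim_equal_calculate_subtests_count := by
  intro power_list air_rate_list X Y _
  unfold Spec_calculate_subtests_count calculate_subtests_count calculate_subtests_count_alt
  simp only []
  rw [pv_loop_eq]
  ring
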